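-- pv_equiv track=rewrite | github.com/neksa/Descriptor_Preprocessor | src/ptr_file/ptr_construct.py | convert_motif_diagram
-- ===== SOURCE A (Python) =====
-- def convert_motif_diagram(seq_motif_map):
--     new_seq_motif_map = dict()
--     for seq_name, _separators in seq_motif_map.items():
--         separators = []
--         curr_count = 1
--         for i, sep in enumerate(_separators):
--             if i == 0:
--                 new_sep = sep + 1
--                 curr_count += sep
--                 curr_count += 13
--             else:
--                 new_sep = curr_count + sep
--                 curr_count += sep
--                 curr_count += 13
--             separators.append(new_sep)
--         new_seq_motif_map[seq_name] = separators
--         assert len(_separators) == len(separators)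
--     return new_seq_motif_map
-- ===== SOURCE B (Python) =====
-- def convert_motif_diagram(seq_motif_map):
--     # Closed formula: position i is 1 + 13*i + sum of the first i+1 separators.
--     return {seq_name: [1 + 13 * i + sum(separators[:i + 1])
--                        for i in range(len(separators))]
--             for seq_name, separators in seq_motif_map.items()}
-- ===== Notes on version B (the rewrite author's own statement) =====
-- stated objective: idiomatic
-- what changed: Replaced the stateful curr_count loop (with its redundant i==0 branch) by a dict comprehension using the closed formula new_sep[i] = 1 + 13*i + sum(separators[:i+1]).
import Mathlib
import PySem

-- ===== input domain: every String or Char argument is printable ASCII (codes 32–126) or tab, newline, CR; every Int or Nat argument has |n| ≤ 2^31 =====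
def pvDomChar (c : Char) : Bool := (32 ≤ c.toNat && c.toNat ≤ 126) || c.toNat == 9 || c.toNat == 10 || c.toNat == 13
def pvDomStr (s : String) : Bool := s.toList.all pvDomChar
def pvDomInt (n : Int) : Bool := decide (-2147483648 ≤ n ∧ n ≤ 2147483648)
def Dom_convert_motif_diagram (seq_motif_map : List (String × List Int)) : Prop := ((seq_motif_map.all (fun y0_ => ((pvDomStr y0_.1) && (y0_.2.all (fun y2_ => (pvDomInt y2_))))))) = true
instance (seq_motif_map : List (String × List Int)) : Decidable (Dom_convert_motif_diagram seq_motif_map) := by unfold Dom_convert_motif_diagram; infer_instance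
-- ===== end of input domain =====

-- B replaces A's stateful curr_count loop by a comprehension with the closed formula
-- 1 + 13*i + sum(separators[:i+1]) (idiomatic; not faster).

-- ===== PORT A =====
-- inner 'for i, sep in enumerate(_separators)' loop of A; state = (separators, curr_count)
def pvA_inner (seps : List Int) : List Int :=
  ((PySem.List.enumerate seps).foldl
    (fun (st : List Int × Int) (p : Int × Int) =>
      if p.1 == 0 then (st.1 ++ [p.2 + 1], st.2 + p.2 + 13)
      else (st.1 ++ [st.2 + p.2], st.2 + p.2 + 13))
    ([], 1)).1

def convert_motif_diagram (seq_motif_map : List (String × List Int)) : List (String × List Int) :=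
  (seq_motif_map.foldl
    (fun (d : PySem.Dict String (List Int)) p => d.insert p.1 (pvA_inner p.2))
    PySem.Dict.empty).items

-- ===== PORT B =====
def pvB_sep (seps : List Int) (i : Int) : Int :=
  1 + 13 * i + (PySem.List.slice seps none (some (i + 1))).sum

def convert_motif_diagram_alt (seq_motif_map : List (String × List Int)) : List (String × List Int) :=
  seq_motif_map.map (fun p =>
    (p.1, (PySem.List.pyRange 0 (p.2.length : Int) 1).map (pvB_sep p.2)))

-- ===== PRECONDITION & SPEC =====
-- Pre_ requires pairwise-distinct sequence names: the Python argument is a dict, which can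
-- never contain duplicate keys, so an association list with a repeated key represents no
-- Python input at all (A's port overwrites in place there, B's maps every entry).
def Pre_convert_motif_diagram (seq_motif_map : List (String × List Int)) : Prop :=
  (seq_motif_map.map Prod.fst).Nodup
instance (seq_motif_map : List (String × List Int)) : Decidable (Pre_convert_motif_diagram seq_motif_map) := by unfold Pre_convert_motif_diagram; infer_instance

def pvWitness_convert_motif_diagram : (List (String × List Int)) := [("x", [3, 0, 2]), ("y", [])]

def Spec_convert_motif_diagram (seq_motif_map : List (String × List Int)) (out : List (String × List Int)) : Prop := out = convert_motif_diagram_alt seq_motif_map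
instance (seq_motif_map : List (String × List Int)) (out : List (String × List Int)) : Decidable (Spec_convert_motif_diagram seq_motif_map out) := by unfold Spec_convert_motif_diagram; infer_instance

-- ===== CLAIM (what is proved, stated in full; the proofs are below) =====
def Claim_equal_convert_motif_diagram : Prop := ∀ (seq_motif_map : List (String × List Int)), Dom_convert_motif_diagram seq_motif_map → Pre_convert_motif_diagram seq_motif_map → Spec_convert_motif_diagram seq_motif_map (convert_motif_diagram seq_motif_map)

-- ===== LEMMAS AND PROOFS =====

-- A's loop body after the first iteration, with the index forgotten
theorem pvA_fold_tail (xs : List Int) : ∀ (k : Nat) (acc : List Int) (c : Int), 0 < k →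
    ((PySem.List.enumerate xs (k : Int)).foldl
      (fun (st : List Int × Int) (p : Int × Int) =>
        if p.1 == 0 then (st.1 ++ [p.2 + 1], st.2 + p.2 + 13)
        else (st.1 ++ [st.2 + p.2], st.2 + p.2 + 13))
      (acc, c)).1
    = acc ++ (List.range xs.length).map (fun j => c + 13 * j + (xs.take (j + 1)).sum) := by
  induction xs with
  | nil => intro k acc c hk; simp [PySem.List.enumerate_nil]
  | cons x xs ih =>
    intro k acc c hk
    rw [PySem.List.enumerate_cons]
    have hne : ((k : Int) == 0) = false := by
      simp only [beq_eq_false_iff_ne, ne_eq]; omega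
    simp only [List.foldl_cons, hne, Bool.false_eq_true, if_false]
    have hc : ((k : Int) + 1) = ((k + 1 : Nat) : Int) := by push_cast; ring
    rw [hc, ih (k + 1) (acc ++ [c + x]) (c + x + 13) (by omega)]
    have htail : (List.range xs.length).map (fun (j : Nat) => (c + x + 13) + 13 * (j : Int) + (xs.take (j + 1)).sum)
        = (List.range xs.length).map (fun (j : Nat) => c + 13 * (Nat.succ j : Int) + ((x :: xs).take (Nat.succ j + 1)).sum) := by
      apply List.map_congr_left
      intro j _
      simp [List.take_succ_cons, Nat.succ_eq_add_one]
      ring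
    rw [htail]
    rw [List.length_cons, List.range_succ_eq_map, List.map_cons, List.map_map]
    simp [Function.comp_def]

theorem pvA_inner_closed (seps : List Int) :
    pvA_inner seps
    = (List.range seps.length).map (fun j => 1 + 13 * j + (seps.take (j + 1)).sum) := by
  cases seps with
  | nil => rfl
  | cons x xs =>
    unfold pvA_inner
    rw [PySem.List.enumerate_cons]
    simp only [List.foldl_cons, beq_self_eq_true, if_true]
    have h1 : ((0 : Int) + 1) = ((1 : Nat) : Int) := by norm_num
    rw [h1, pvA_fold_tail xs 1 ([] ++ [x + 1]) (1 + x + 13) (by omega)]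
    have htail : (List.range xs.length).map (fun (j : Nat) => (1 + x + 13) + 13 * (j : Int) + (xs.take (j + 1)).sum)
        = (List.range xs.length).map (fun (j : Nat) => 1 + 13 * (Nat.succ j : Int) + ((x :: xs).take (Nat.succ j + 1)).sum) := by
      apply List.map_congr_left
      intro j _
      simp [List.take_succ_cons, Nat.succ_eq_add_one]
      ring
    rw [htail]
    rw [List.length_cons, List.range_succ_eq_map, List.map_cons, List.map_map]
    simp [Function.comp_def]
    ring

theorem pvB_row_closed (seps : List Int) :
    (PySem.List.pyRange 0 (seps.length : Int) 1).map (pvB_sep seps)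
    = (List.range seps.length).map (fun j => 1 + 13 * j + (seps.take (j + 1)).sum) := by
  rw [PySem.List.pyRange_one, List.map_map]
  simp only [sub_zero, Int.toNat_natCast]
  congr 1
  funext j
  simp only [Function.comp_apply, pvB_sep, zero_add]
  have : ((j : Int) + 1) = ((j + 1 : Nat) : Int) := by push_cast; ring
  rw [this, PySem.List.slice_to_natCast]

-- ===== VERDICT (by name: the statement is the Claim_ definition above) =====
theorem convert_motif_diagram_spec : Claim_equal_convert_motif_diagram := by
  intro m _hdom hpre
  unfold Spec_convert_motif_diagram convert_motif_diagram convert_motif_diagram_alt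
  rw [PySem.Dict.items_foldl_insert_fresh (d := PySem.Dict.empty)
       (k := Prod.fst) (v := fun p => pvA_inner p.2) (l := m)
       (fun a _ => PySem.Dict.contains_empty _) hpre]
  simp only [PySem.Dict.empty, List.nil_append]
  apply List.map_congr_left
  intro p _
  rw [pvA_inner_closed, pvB_row_closed]
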